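-- pv_equiv track=rewrite | github.com/vitorpy/rust-openzl | openzl-sys/vendor/openzl/scripts/copyright.py | get_comment_syntax
-- ===== SOURCE A (Python) =====
-- from typing import Optional, Tuple
--
-- SUFFIX_TO_COMMENT = {
--     "CMakeLists.txt": "#",
--     ".cmake": "#",
--     ".cmake.in": "#",
--     ".h.cmake": "//",
--     ".cpp": "//",
--     ".hpp": "//",
--     ".c": "//",
--     ".h": "//",
--     ".py": "#",
--     ".pyi": "#",
--     ".sh": "#",
--     ".js": "//",
--     ".ts": "//",
--     ".yml": "#",
--     ".toml": "#",
--     ".tsx": "//",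
--     ".css": ("/*", "*/"),
--     ".html.jinja": ("{#-", "-#}"),
--     ".html": ("<!--", "-->"),
--     "Makefile": "#",
--     ".make": "#",
--     ".thrift": "//",
--     ".bzl": "#",
--     "PACKAGE": "#",
--     ".bat": "::",
--     ".ps1": "#",
--     "Doxyfile": "#",
--     "static_docs_build_script": "#",
--     "BUCK": "#",
--     ".proto": "//",
-- }
--
-- def get_comment_syntax(file: str) -> Optional[Tuple[str, str]]:
--     best_suffix = ""
--     for suffix in SUFFIX_TO_COMMENT.keys():
--         if file.endswith(suffix) and len(suffix) > len(best_suffix):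
--             best_suffix = suffix
--     if best_suffix != "":
--         syntax = SUFFIX_TO_COMMENT[best_suffix]
--         if isinstance(syntax, str):
--             return (syntax, None)
--         else:
--             return syntax
--     else:
--         return None
-- ===== SOURCE B (Python) =====
-- from typing import Optional, Tuple
--
-- # Precomputed lookup table: suffixes ordered by length descending, with the
-- # comment syntax already normalized to a (start, end-or-None) pair.  The first
-- # suffix of 'file' found in this order is the longest one (two distinct
-- # suffixes of equal length can never both be suffixes of the same string).
-- ORDERED_SUFFIX_COMMENTS = [
--     ("static_docs_build_script", ("#", None)),
--     ("CMakeLists.txt", ("#", None)),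
--     (".html.jinja", ("{#-", "-#}")),
--     (".cmake.in", ("#", None)),
--     (".h.cmake", ("//", None)),
--     ("Makefile", ("#", None)),
--     ("Doxyfile", ("#", None)),
--     (".thrift", ("//", None)),
--     ("PACKAGE", ("#", None)),
--     (".cmake", ("#", None)),
--     (".proto", ("//", None)),
--     (".toml", ("#", None)),
--     (".html", ("<!--", "-->")),
--     (".make", ("#", None)),
--     (".cpp", ("//", None)),
--     (".hpp", ("//", None)),
--     (".pyi", ("#", None)),
--     (".yml", ("#", None)),
--     (".tsx", ("//", None)),
--     (".css", ("/*", "*/")),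
--     (".bzl", ("#", None)),
--     (".bat", ("::", None)),
--     (".ps1", ("#", None)),
--     ("BUCK", ("#", None)),
--     (".py", ("#", None)),
--     (".sh", ("#", None)),
--     (".js", ("//", None)),
--     (".ts", ("//", None)),
--     (".c", ("//", None)),
--     (".h", ("//", None)),
-- ]
--
-- def get_comment_syntax(file: str) -> Optional[Tuple[str, str]]:
--     return next((syntax for suffix, syntax in ORDERED_SUFFIX_COMMENTS
--                  if file.endswith(suffix)), None)
-- ===== Notes on version B (the rewrite author's own statement) =====
-- stated objective: alternative
-- what changed: Replaced the best-suffix accumulator scan over the raw dict plus post-hoc lookup and str/tuple normalization by a single precomputed table of (suffix, normalized pair) ordered by suffix length descending, returning the first match (longest-match = first match in that order, since distinct equal-length suffixes cannot both match).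
import Mathlib
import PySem

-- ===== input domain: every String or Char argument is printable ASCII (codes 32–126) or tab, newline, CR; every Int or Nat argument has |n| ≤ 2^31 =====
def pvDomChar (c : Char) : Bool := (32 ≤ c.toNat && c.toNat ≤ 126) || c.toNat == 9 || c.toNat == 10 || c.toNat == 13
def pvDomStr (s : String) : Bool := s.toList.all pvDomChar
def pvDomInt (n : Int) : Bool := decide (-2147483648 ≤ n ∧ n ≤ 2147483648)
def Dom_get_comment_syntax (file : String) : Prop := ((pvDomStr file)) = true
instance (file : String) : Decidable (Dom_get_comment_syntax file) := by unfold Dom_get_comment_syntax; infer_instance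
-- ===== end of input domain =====

-- B replaces A's best-suffix accumulator over the dict + post-hoc lookup/normalization
-- by a precomputed length-descending table of normalized pairs, returning the first match.

-- ===== PORT A =====
-- the module constant SUFFIX_TO_COMMENT (values: str ↦ .inl, tuple ↦ .inr)
def suffixTable : PySem.Dict String (String ⊕ String × String) := PySem.Dict.mk [
  ("CMakeLists.txt", .inl "#"), (".cmake", .inl "#"), (".cmake.in", .inl "#"),
  (".h.cmake", .inl "//"), (".cpp", .inl "//"), (".hpp", .inl "//"),
  (".c", .inl "//"), (".h", .inl "//"), (".py", .inl "#"), (".pyi", .inl "#"),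
  (".sh", .inl "#"), (".js", .inl "//"), (".ts", .inl "//"), (".yml", .inl "#"),
  (".toml", .inl "#"), (".tsx", .inl "//"), (".css", .inr ("/*", "*/")),
  (".html.jinja", .inr ("{#-", "-#}")), (".html", .inr ("<!--", "-->")),
  ("Makefile", .inl "#"), (".make", .inl "#"), (".thrift", .inl "//"),
  (".bzl", .inl "#"), ("PACKAGE", .inl "#"), (".bat", .inl "::"),
  (".ps1", .inl "#"), ("Doxyfile", .inl "#"),
  ("static_docs_build_script", .inl "#"), ("BUCK", .inl "#"), (".proto", .inl "//")]

-- loop body of A: keep the longer matching suffix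
def pvStepA (file best suffix : String) : String :=
  if PySem.Str.endswith file suffix && decide (PySem.Str.len best < PySem.Str.len suffix)
  then suffix else best

-- "(syntax, None) if isinstance(syntax, str) else syntax"
def pvNormalize (v : String ⊕ String × String) : String × Option String :=
  match v with
  | .inl s => (s, none)
  | .inr p => (p.1, some p.2)

def get_comment_syntax (file : String) : Option (String × Option String) :=
  let best := (PySem.Dict.keys suffixTable).foldl (pvStepA file) ""
  if best ≠ "" then
    match PySem.Dict.get? suffixTable best with
    | some syn => some (pvNormalize syn)
    | none => none          -- KeyError (unreachable: best is a key)
  else none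

-- ===== PORT B =====
-- Source B's module constant ORDERED_SUFFIX_COMMENTS: suffixes by length descending,
-- values already normalized to (start, end-or-none)
def orderedSuffixComments : List (String × (String × Option String)) := [
  ("static_docs_build_script", ("#", none)),
  ("CMakeLists.txt", ("#", none)),
  (".html.jinja", ("{#-", some "-#}")),
  (".cmake.in", ("#", none)),
  (".h.cmake", ("//", none)),
  ("Makefile", ("#", none)),
  ("Doxyfile", ("#", none)),
  (".thrift", ("//", none)),
  ("PACKAGE", ("#", none)),
  (".cmake", ("#", none)),
  (".proto", ("//", none)),
  (".toml", ("#", none)),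
  (".html", ("<!--", some "-->")),
  (".make", ("#", none)),
  (".cpp", ("//", none)),
  (".hpp", ("//", none)),
  (".pyi", ("#", none)),
  (".yml", ("#", none)),
  (".tsx", ("//", none)),
  (".css", ("/*", some "*/")),
  (".bzl", ("#", none)),
  (".bat", ("::", none)),
  (".ps1", ("#", none)),
  ("BUCK", ("#", none)),
  (".py", ("#", none)),
  (".sh", ("#", none)),
  (".js", ("//", none)),
  (".ts", ("//", none)),
  (".c", ("//", none)),
  (".h", ("//", none))]

-- "next((syntax for suffix, syntax in ORDERED_SUFFIX_COMMENTS if file.endswith(suffix)), None)"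
def get_comment_syntax_alt (file : String) : Option (String × Option String) :=
  (orderedSuffixComments.find? (fun kv => PySem.Str.endswith file kv.1)).map (·.2)

-- ===== PRECONDITION & SPEC =====
def Spec_get_comment_syntax (file : String) (out : Option (String × Option String)) : Prop := out = get_comment_syntax_alt file
instance (file : String) (out : Option (String × Option String)) : Decidable (Spec_get_comment_syntax file out) := by unfold Spec_get_comment_syntax; infer_instance

-- ===== CLAIM =====
def Claim_equal_get_comment_syntax : Prop := ∀ (file : String), Dom_get_comment_syntax file → Spec_get_comment_syntax file (get_comment_syntax file)

-- ===== LEMMAS AND PROOFS =====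

-- two suffixes of the same list with equal length are equal
theorem pv_suffix_eq_of_len_eq {α : Type} {l₁ l₂ l : List α}
    (h1 : l₁ <:+ l) (h2 : l₂ <:+ l) (h : l₁.length = l₂.length) : l₁ = l₂ := by
  obtain ⟨t1, e1⟩ := h1
  obtain ⟨t2, e2⟩ := h2
  have ht : t1.length = t2.length := by
    have e1' := congrArg List.length e1
    have e2' := congrArg List.length e2
    simp only [List.length_append] at e1' e2'
    omega
  have d1 : (t1 ++ l₁).drop t1.length = l₁ := by simp
  have d2 : (t2 ++ l₂).drop t2.length = l₂ := by simp
  rw [e1] at d1; rw [e2] at d2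
  rw [← d1, ← d2, ht]

-- strings: equal-length suffixes of the same string coincide
theorem pv_str_suffix_eq {file s t : String}
    (hs : PySem.Str.endswith file s = true) (ht : PySem.Str.endswith file t = true)
    (h : PySem.Str.len s = PySem.Str.len t) : s = t := by
  simp only [PySem.Str.endswith_eq, PySem.Chars.endswith_iff] at hs ht
  simp only [PySem.Str.len_eq, Nat.cast_inj] at h
  exact String.toList_inj.mp (pv_suffix_eq_of_len_eq hs ht h)

-- characterisation of A's fold
theorem pv_fold_spec (file : String) (L : List String) (b : String) :
    (L.foldl (pvStepA file) b = b ∨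
      (L.foldl (pvStepA file) b ∈ L ∧ PySem.Str.endswith file (L.foldl (pvStepA file) b) = true)) ∧
    PySem.Str.len b ≤ PySem.Str.len (L.foldl (pvStepA file) b) ∧
    (∀ s ∈ L, PySem.Str.endswith file s = true → PySem.Str.len s ≤ PySem.Str.len (L.foldl (pvStepA file) b)) := by
  induction L generalizing b with
  | nil => simp
  | cons a L ih =>
    simp only [List.foldl_cons]
    obtain ⟨ih1, ih2, ih3⟩ := ih (pvStepA file b a)
    have hmono : PySem.Str.len b ≤ PySem.Str.len (pvStepA file b a) := by
      unfold pvStepA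
      split
      · next hc =>
        simp only [Bool.and_eq_true, decide_eq_true_eq] at hc
        exact le_of_lt hc.2
      · exact le_refl _
    by_cases hc : (PySem.Str.endswith file a && decide (PySem.Str.len b < PySem.Str.len a)) = true
    · have hstep : pvStepA file b a = a := by unfold pvStepA; rw [if_pos hc]
      simp only [Bool.and_eq_true, decide_eq_true_eq] at hc
      refine ⟨?_, le_trans hmono ih2, ?_⟩
      · rcases ih1 with h | h
        · rw [h, hstep]; exact Or.inr ⟨by simp, hc.1⟩
        · exact Or.inr ⟨List.mem_cons_of_mem _ h.1, h.2⟩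
      · intro s hs hm
        rcases List.mem_cons.mp hs with h | h
        · subst h
          calc PySem.Str.len s = PySem.Str.len (pvStepA file b s) := by rw [hstep]
            _ ≤ PySem.Str.len (List.foldl (pvStepA file) (pvStepA file b s) L) := ih2
        · exact ih3 s h hm
    · have hstep : pvStepA file b a = b := by unfold pvStepA; rw [if_neg hc]
      rw [hstep] at ih1 ih2 ih3 ⊢
      refine ⟨?_, ih2, ?_⟩
      · rcases ih1 with h | h
        · exact Or.inl h
        · exact Or.inr ⟨List.mem_cons_of_mem _ h.1, h.2⟩
      · intro s hs hm
        rcases List.mem_cons.mp hs with h | h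
        · subst h
          have : ¬ PySem.Str.len b < PySem.Str.len s := by
            intro hlt
            exact hc (by
              simp only [Bool.and_eq_true, decide_eq_true_eq]
              exact ⟨hm, hlt⟩)
          exact le_trans (not_lt.mp this) ih2
        · exact ih3 s h hm

-- characterisation of B's find? over a table sorted descending by suffix length
theorem pv_find_spec (file : String) (T : List (String × (String × Option String)))
    (hp : (T.map Prod.fst).Pairwise (fun a b => PySem.Str.len b ≤ PySem.Str.len a)) :
    (T.find? (fun kv => PySem.Str.endswith file kv.1) = none →
      ∀ s ∈ T.map Prod.fst, ¬ PySem.Str.endswith file s = true) ∧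
    (∀ p, T.find? (fun kv => PySem.Str.endswith file kv.1) = some p →
      p ∈ T ∧ PySem.Str.endswith file p.1 = true ∧
      ∀ t ∈ T.map Prod.fst, PySem.Str.endswith file t = true → PySem.Str.len t ≤ PySem.Str.len p.1) := by
  induction T with
  | nil => simp
  | cons a T ih =>
    simp only [List.map_cons, List.pairwise_cons] at hp
    obtain ⟨hpa, hpT⟩ := hp
    obtain ⟨ih1, ih2⟩ := ih hpT
    constructor
    · intro hn s hs
      rw [List.find?_cons] at hn
      split at hn
      · exact absurd hn (by simp)
      · next hna =>
        rcases List.mem_cons.mp hs with h | h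
        · subst h; simpa using hna
        · exact ih1 hn s h
    · intro p hf
      rw [List.find?_cons] at hf
      split at hf
      · next ha =>
        cases hf
        refine ⟨by simp, ha, ?_⟩
        intro t ht _
        rcases List.mem_cons.mp ht with h | h
        · subst h; exact le_refl _
        · exact hpa t h
      · next hna =>
        obtain ⟨h1, h2, h3⟩ := ih2 p hf
        refine ⟨List.mem_cons_of_mem _ h1, h2, ?_⟩
        intro t ht hm
        rcases List.mem_cons.mp ht with h | h
        · subst h; exact absurd hm (by simpa using hna)
        · exact h3 t h hm

-- the table's suffixes are the dict's keys
theorem pv_table_keys_perm : (orderedSuffixComments.map Prod.fst).Perm (PySem.Dict.keys suffixTable) := by decide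

-- the table's suffixes are in length-descending order
theorem pv_table_sorted : (orderedSuffixComments.map Prod.fst).Pairwise (fun a b => PySem.Str.len b ≤ PySem.Str.len a) := by decide

-- each table row is the normalized dict entry for its suffix
theorem pv_table_values : ∀ p ∈ orderedSuffixComments, (PySem.Dict.get? suffixTable p.1).map pvNormalize = some p.2 := by decide

-- every key of the table is nonempty
theorem pv_keys_ne_empty : ∀ s ∈ PySem.Dict.keys suffixTable, s ≠ "" := by decide

-- ===== VERDICT =====
theorem get_comment_syntax_spec : Claim_equal_get_comment_syntax := by
  intro file _
  show get_comment_syntax file = get_comment_syntax_alt file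
  unfold get_comment_syntax get_comment_syntax_alt
  set L := PySem.Dict.keys suffixTable with hL
  obtain ⟨hf1, hf2⟩ := pv_find_spec file orderedSuffixComments pv_table_sorted
  obtain ⟨ha1, ha2, ha3⟩ := pv_fold_spec file L ""
  set r := L.foldl (pvStepA file) "" with hr
  cases hfind : orderedSuffixComments.find? (fun kv => PySem.Str.endswith file kv.1) with
  | none =>
    have hno : ∀ s ∈ L, ¬ PySem.Str.endswith file s = true := by
      intro s hs
      exact hf1 hfind s (pv_table_keys_perm.mem_iff.mpr hs)
    have hr0 : r = "" := by
      rcases ha1 with h | h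
      · exact h
      · exact absurd h.2 (hno r h.1)
    rw [hr0]
    simp
  | some p =>
    obtain ⟨hpT, hpm, hpmax⟩ := hf2 p hfind
    have hsL : p.1 ∈ L := pv_table_keys_perm.mem_iff.mp (List.mem_map_of_mem hpT)
    have hrs : r = p.1 := by
      rcases ha1 with h | h
      · exfalso
        have hle := ha3 p.1 hsL hpm
        rw [h] at hle
        have hlen0 : p.1.toList.length = 0 := by
          simp only [PySem.Str.len_eq] at hle
          have h0 : ("" : String).toList.length = 0 := by decide
          omega
        have hempty : p.1 = "" :=
          String.toList_inj.mp (List.length_eq_zero_iff.mp hlen0)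
        exact pv_keys_ne_empty p.1 hsL hempty
      · have h1 := ha3 p.1 hsL hpm
        have h2 := hpmax r (pv_table_keys_perm.mem_iff.mpr h.1) h.2
        exact pv_str_suffix_eq h.2 hpm (le_antisymm h2 h1)
    have hne : r ≠ "" := by
      rw [hrs]; exact pv_keys_ne_empty p.1 hsL
    rw [if_pos hne, hrs]
    have hv := pv_table_values p hpT
    cases hget : PySem.Dict.get? suffixTable p.1 with
    | none => rw [hget] at hv; simp at hv
    | some syn =>
      rw [hget] at hv
      simp only [Option.map_some, Option.some.injEq] at hv
      simp [hv]
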